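-- pv_equiv track=rewrite | github.com/Sahilraj3107/leetcode | 3637-trionic-array-i/3637-trionic-array-i.py | isTrionic
-- ===== SOURCE A (Python) =====
-- from typing import List
--
-- def isTrionic(nums: List[int]) -> bool:
--     n = len(nums)
--     if n < 3:
--         return False
--     p = 0
--     while p + 1 < n and nums[p] < nums[p + 1]:
--         p += 1
--     if p == 0 or p > n - 3:
--         return False
--     q = p
--     while q + 1 < n and nums[q] > nums[q + 1]:
--         q += 1
--     if q == p or q >= n - 1:
--         return False
--     for i in range(q, n - 1):
--         if nums[i] >= nums[i + 1]:
--             return False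
--     return True
-- ===== SOURCE B (Python) =====
-- from typing import List
--
-- def isTrionic(nums: List[int]) -> bool:
--     if len(nums) < 3:
--         return False
--     signs = [(1 if a < b else (-1 if a > b else 0)) for a, b in zip(nums, nums[1:])]
--     runs = []
--     for s in signs:
--         if not runs or runs[-1] != s:
--             runs.append(s)
--     return runs == [1, -1, 1]
-- ===== Notes on version B (the rewrite author's own statement) =====
-- stated objective: alternative
-- what changed: A's three greedy index phases (ascend-while, descend-while, final ascent check) are replaced by one pass that builds the sign list of consecutive differences and collapses it into runs, returning True iff there are exactly three runs with signs plus, minus, plus.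
import Mathlib
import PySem

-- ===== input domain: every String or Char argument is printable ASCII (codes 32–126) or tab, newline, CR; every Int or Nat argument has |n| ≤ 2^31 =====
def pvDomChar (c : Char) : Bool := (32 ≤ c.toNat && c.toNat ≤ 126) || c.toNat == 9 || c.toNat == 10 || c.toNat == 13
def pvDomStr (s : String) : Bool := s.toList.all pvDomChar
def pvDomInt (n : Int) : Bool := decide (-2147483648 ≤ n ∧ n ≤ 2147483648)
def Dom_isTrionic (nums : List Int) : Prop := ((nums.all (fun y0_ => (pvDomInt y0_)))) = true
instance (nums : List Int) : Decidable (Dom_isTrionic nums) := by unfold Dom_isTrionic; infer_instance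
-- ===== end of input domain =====

-- B replaces A's three greedy index phases by one pass building the sign list of consecutive
-- differences and collapsing it into runs (alternative decomposition, same O(n) cost).

-- ===== PORT A =====
-- nums[i]: every use below has i : Nat with i (or i + 1) < n guarded, so getD is exact
def pvGetA (nums : List Int) (i : Nat) : Int := nums.getD i 0

-- while p + 1 < n and nums[p] < nums[p + 1]: p += 1   (fuel ≥ remaining iterations; the port passes fuel = n)
def pvLoopUp (nums : List Int) (n : Nat) : Nat → Nat → Nat
  | 0, p => p
  | fuel + 1, p =>
    if p + 1 < n ∧ pvGetA nums p < pvGetA nums (p + 1) then pvLoopUp nums n fuel (p + 1) else p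

-- while q + 1 < n and nums[q] > nums[q + 1]: q += 1
def pvLoopDown (nums : List Int) (n : Nat) : Nat → Nat → Nat
  | 0, q => q
  | fuel + 1, q =>
    if q + 1 < n ∧ pvGetA nums q > pvGetA nums (q + 1) then pvLoopDown nums n fuel (q + 1) else q

def isTrionic (nums : List Int) : Bool :=
  let n := nums.length
  if n < 3 then false
  else
    let p := pvLoopUp nums n n 0
    if p = 0 ∨ p > n - 3 then false
    else
      let q := pvLoopDown nums n n p
      if q = p ∨ q ≥ n - 1 then false
      else
        -- for i in range(q, n - 1): return False unless nums[i] < nums[i + 1]  (here q ≤ n - 1)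
        (List.range' q (n - 1 - q)).all (fun i => decide (pvGetA nums i < pvGetA nums (i + 1)))

-- ===== PORT B =====
-- [1 if a < b else (-1 if a > b else 0) for a, b in zip(nums, nums[1:])]
def pvSigns (nums : List Int) : List Int :=
  (nums.zip (PySem.List.slice nums (some 1) none)).map
    (fun ab => if ab.1 < ab.2 then 1 else if ab.1 > ab.2 then -1 else 0)

-- loop body: if not runs or runs[-1] != s: runs.append(s)
def pvRunStep (runs : List Int) (s : Int) : List Int :=
  if runs = [] ∨ runs.getLast? ≠ some s then runs ++ [s] else runs

def isTrionic_alt (nums : List Int) : Bool :=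
  if nums.length < 3 then false
  else decide ((pvSigns nums).foldl pvRunStep [] = [1, -1, 1])

-- ===== PRECONDITION & SPEC =====
def Spec_isTrionic (nums : List Int) (out : Bool) : Prop := out = isTrionic_alt nums
instance (nums : List Int) (out : Bool) : Decidable (Spec_isTrionic nums out) := by unfold Spec_isTrionic; infer_instance

-- ===== CLAIM (what is proved, stated in full; the proofs are below) =====
def Claim_equal_isTrionic : Prop := ∀ (nums : List Int), Dom_isTrionic nums → Spec_isTrionic nums (isTrionic nums)

-- ===== LEMMAS AND PROOFS =====

-- proof-side view of B's run collapse: the runs still to be emitted when the last emitted sign was x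
def runsFrom (x : Int) : List Int → List Int
  | [] => []
  | s :: l => if s = x then runsFrom x l else s :: runsFrom s l

-- the common characterisation both programs are reduced to
def TriShape (nums : List Int) : Prop :=
  3 ≤ nums.length ∧
  (pvSigns nums).head? = some 1 ∧
  ((pvSigns nums).dropWhile (fun s => s = 1)).head? = some (-1) ∧
  (((pvSigns nums).dropWhile (fun s => s = 1)).dropWhile (fun s => s = -1)) ≠ [] ∧
  ∀ s ∈ ((pvSigns nums).dropWhile (fun s => s = 1)).dropWhile (fun s => s = -1), s = 1

lemma drop_length_takeWhile (p : Int → Bool) (l : List Int) :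
    l.drop (l.takeWhile p).length = l.dropWhile p := by
  induction l with
  | nil => simp
  | cons x l ih => by_cases h : p x <;> simp [h, ih]

lemma length_takeWhile_add (p : Int → Bool) (l : List Int) :
    (l.takeWhile p).length + (l.dropWhile p).length = l.length := by
  conv_rhs => rw [← List.takeWhile_append_dropWhile (p := p) (l := l)]
  rw [List.length_append]

lemma head_of_takeWhile_pos (p : Int → Bool) (l : List Int)
    (h : 0 < (l.takeWhile p).length) : ∃ x, l.head? = some x ∧ p x = true := by
  cases l with
  | nil => simp at h
  | cons x l =>
    by_cases hx : p x
    · exact ⟨x, rfl, hx⟩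
    · simp [hx] at h

lemma takeWhile_pos_of_head (p : Int → Bool) (l : List Int) (x : Int)
    (h : l.head? = some x) (hx : p x = true) : 0 < (l.takeWhile p).length := by
  cases l with
  | nil => simp at h
  | cons y l =>
    simp at h
    subst h
    simp [hx]

lemma pvSigns_length (nums : List Int) : (pvSigns nums).length = nums.length - 1 := by
  simp [pvSigns, PySem.List.slice_from_one]

lemma pvSigns_getD (nums : List Int) (i : Nat) (h : i + 1 < nums.length) :
    (pvSigns nums).getD i 0 =
      (if pvGetA nums i < pvGetA nums (i + 1) then 1
       else if pvGetA nums i > pvGetA nums (i + 1) then -1 else 0) := by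
  have hlen : i < (pvSigns nums).length := by rw [pvSigns_length]; omega
  rw [List.getD_eq_getElem _ _ hlen]
  simp only [pvSigns, PySem.List.slice_from_one, List.getElem_map, List.getElem_zip,
    List.getElem_tail, pvGetA]
  simp [List.getD, List.getElem?_eq_getElem h, List.getElem?_eq_getElem (show i < nums.length by omega)]

lemma pvSigns_getElem_one_iff (nums : List Int) (i : Nat) (h : i + 1 < nums.length)
    (hlen : i < (pvSigns nums).length) :
    ((pvSigns nums)[i] = 1) ↔ pvGetA nums i < pvGetA nums (i + 1) := by
  have hv := pvSigns_getD nums i h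
  rw [List.getD_eq_getElem _ _ hlen] at hv
  rw [hv]
  constructor
  · intro h1
    by_contra hnlt
    rw [if_neg hnlt] at h1
    split at h1 <;> omega
  · intro h1
    rw [if_pos h1]

lemma pvSigns_getElem_neg_one_iff (nums : List Int) (i : Nat) (h : i + 1 < nums.length)
    (hlen : i < (pvSigns nums).length) :
    ((pvSigns nums)[i] = -1) ↔ pvGetA nums i > pvGetA nums (i + 1) := by
  have hv := pvSigns_getD nums i h
  rw [List.getD_eq_getElem _ _ hlen] at hv
  rw [hv]
  constructor
  · intro h1
    by_contra hngt
    rw [if_neg (by omega : ¬ pvGetA nums i < pvGetA nums (i + 1))] at h1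
    · rw [if_neg hngt] at h1; omega
  · intro h1
    rw [if_neg (by omega), if_pos h1]

lemma loopUp_eq (nums : List Int) (fuel p : Nat) (hp : p ≤ nums.length - 1)
    (hf : nums.length - 1 - p ≤ fuel) :
    pvLoopUp nums nums.length fuel p
      = p + (((pvSigns nums).drop p).takeWhile (fun s => s = 1)).length := by
  induction fuel generalizing p with
  | zero =>
    have hnil : (pvSigns nums).drop p = [] :=
      List.drop_eq_nil_of_le (by rw [pvSigns_length]; omega)
    simp [pvLoopUp, hnil]
  | succ fuel ih =>
    by_cases hc : p + 1 < nums.length ∧ pvGetA nums p < pvGetA nums (p + 1)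
    · rw [pvLoopUp, if_pos hc]
      have hplt : p < (pvSigns nums).length := by rw [pvSigns_length]; omega
      have hdrop : (pvSigns nums).drop p = (pvSigns nums)[p] :: (pvSigns nums).drop (p + 1) :=
        (List.getElem_cons_drop hplt).symm
      have hget : (pvSigns nums)[p] = 1 :=
        (pvSigns_getElem_one_iff nums p hc.1 hplt).mpr hc.2
      rw [ih (p + 1) (by omega) (by omega), hdrop, hget]
      simp
      omega
    · rw [pvLoopUp, if_neg hc]
      rcases Nat.lt_or_ge (p + 1) nums.length with hlt | hge
      · have hplt : p < (pvSigns nums).length := by rw [pvSigns_length]; omega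
        have hdrop : (pvSigns nums).drop p = (pvSigns nums)[p] :: (pvSigns nums).drop (p + 1) :=
          (List.getElem_cons_drop hplt).symm
        have hget : (pvSigns nums)[p] ≠ 1 := by
          intro h1
          exact hc ⟨hlt, (pvSigns_getElem_one_iff nums p hlt hplt).mp h1⟩
        rw [hdrop]
        simp [hget]
      · have hnil : (pvSigns nums).drop p = [] :=
          List.drop_eq_nil_of_le (by rw [pvSigns_length]; omega)
        simp [hnil]

lemma loopDown_eq (nums : List Int) (fuel p : Nat) (hp : p ≤ nums.length - 1)
    (hf : nums.length - 1 - p ≤ fuel) :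
    pvLoopDown nums nums.length fuel p
      = p + (((pvSigns nums).drop p).takeWhile (fun s => s = -1)).length := by
  induction fuel generalizing p with
  | zero =>
    have hnil : (pvSigns nums).drop p = [] :=
      List.drop_eq_nil_of_le (by rw [pvSigns_length]; omega)
    simp [pvLoopDown, hnil]
  | succ fuel ih =>
    by_cases hc : p + 1 < nums.length ∧ pvGetA nums p > pvGetA nums (p + 1)
    · rw [pvLoopDown, if_pos hc]
      have hplt : p < (pvSigns nums).length := by rw [pvSigns_length]; omega
      have hdrop : (pvSigns nums).drop p = (pvSigns nums)[p] :: (pvSigns nums).drop (p + 1) :=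
        (List.getElem_cons_drop hplt).symm
      have hget : (pvSigns nums)[p] = -1 :=
        (pvSigns_getElem_neg_one_iff nums p hc.1 hplt).mpr hc.2
      rw [ih (p + 1) (by omega) (by omega), hdrop, hget]
      simp
      omega
    · rw [pvLoopDown, if_neg hc]
      rcases Nat.lt_or_ge (p + 1) nums.length with hlt | hge
      · have hplt : p < (pvSigns nums).length := by rw [pvSigns_length]; omega
        have hdrop : (pvSigns nums).drop p = (pvSigns nums)[p] :: (pvSigns nums).drop (p + 1) :=
          (List.getElem_cons_drop hplt).symm
        have hget : (pvSigns nums)[p] ≠ -1 := by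
          intro h1
          exact hc ⟨hlt, (pvSigns_getElem_neg_one_iff nums p hlt hplt).mp h1⟩
        rw [hdrop]
        simp [hget]
      · have hnil : (pvSigns nums).drop p = [] :=
          List.drop_eq_nil_of_le (by rw [pvSigns_length]; omega)
        simp [hnil]

lemma forLoop_eq (nums : List Int) (k q : Nat) (hk : q + k = nums.length - 1) :
    (List.range' q k).all (fun i => decide (pvGetA nums i < pvGetA nums (i + 1)))
      = ((pvSigns nums).drop q).all (fun s => decide (s = 1)) := by
  induction k generalizing q with
  | zero =>
    have hnil : (pvSigns nums).drop q = [] :=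
      List.drop_eq_nil_of_le (by rw [pvSigns_length]; omega)
    simp [hnil]
  | succ k ih =>
    have hqlt : q < (pvSigns nums).length := by rw [pvSigns_length]; omega
    have hq1 : q + 1 < nums.length := by
      have := pvSigns_length nums
      omega
    have hdrop : (pvSigns nums).drop q = (pvSigns nums)[q] :: (pvSigns nums).drop (q + 1) :=
      (List.getElem_cons_drop hqlt).symm
    rw [List.range'_succ, hdrop]
    simp only [List.all_cons]
    rw [ih (q + 1) (by omega),
      decide_eq_decide.mpr (pvSigns_getElem_one_iff nums q hq1 hqlt).symm]

lemma foldl_runStep (l : List Int) (acc : List Int) (x : Int)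
    (hne : acc ≠ []) (hlast : acc.getLast? = some x) :
    List.foldl pvRunStep acc l = acc ++ runsFrom x l := by
  induction l generalizing acc x with
  | nil => simp [runsFrom]
  | cons s l ih =>
    by_cases hsx : s = x
    · subst hsx
      have hstep : pvRunStep acc s = acc := by
        simp [pvRunStep, hne, hlast]
      rw [List.foldl_cons, hstep, ih acc s hne hlast]
      simp [runsFrom]
    · have hstep : pvRunStep acc s = acc ++ [s] := by
        rw [pvRunStep, if_pos]
        right
        rw [hlast]
        simp
        omega
      rw [List.foldl_cons, hstep,
        ih (acc ++ [s]) s (by simp) List.getLast?_concat]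
      simp [runsFrom, hsx]
  
lemma runsFrom_eq_nil_iff (x : Int) (l : List Int) :
    runsFrom x l = [] ↔ ∀ s ∈ l, s = x := by
  induction l with
  | nil => simp [runsFrom]
  | cons s l ih =>
    by_cases hsx : s = x
    · subst hsx
      simp [runsFrom, ih]
    · simp [runsFrom, hsx]

lemma runsFrom_dropWhile (x : Int) (l : List Int) :
    runsFrom x l =
      (match l.dropWhile (fun s => s = x) with
       | [] => []
       | s :: l' => s :: runsFrom s l') := by
  induction l with
  | nil => simp [runsFrom]
  | cons s l ih =>
    by_cases hsx : s = x
    · subst hsx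
      simp [runsFrom, ih]
    · simp [runsFrom, hsx]

lemma A_char (nums : List Int) : isTrionic nums = true ↔ TriShape nums := by
  by_cases hn : nums.length < 3
  · simp only [isTrionic, if_pos hn, TriShape]
    simp
    omega
  · have hn3 : 3 ≤ nums.length := by omega
    have hdlen := pvSigns_length nums
    have hda := drop_length_takeWhile (fun s => decide (s = 1)) (pvSigns nums)
    have hd_split := length_takeWhile_add (fun s => decide (s = 1)) (pvSigns nums)
    have hr1b := drop_length_takeWhile (fun s => decide (s = -1))
      ((pvSigns nums).dropWhile (fun s => s = 1))
    have hr1_split := length_takeWhile_add (fun s => decide (s = -1))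
      ((pvSigns nums).dropWhile (fun s => s = 1))
    have hp : pvLoopUp nums nums.length nums.length 0
        = ((pvSigns nums).takeWhile (fun s => s = 1)).length := by
      have := loopUp_eq nums nums.length 0 (by omega) (by omega)
      simpa using this
    have hq : pvLoopDown nums nums.length nums.length
          ((pvSigns nums).takeWhile (fun s => s = 1)).length
        = ((pvSigns nums).takeWhile (fun s => s = 1)).length
          + (((pvSigns nums).dropWhile (fun s => s = 1)).takeWhile (fun s => s = -1)).length := by
      have := loopDown_eq nums nums.length
        ((pvSigns nums).takeWhile (fun s => s = 1)).length (by omega) (by omega)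
      rw [hda] at this
      exact this
    simp only [isTrionic, if_neg hn, hp, hq]
    set a := ((pvSigns nums).takeWhile (fun s => s = 1)).length with ha
    set b := (((pvSigns nums).dropWhile (fun s => s = 1)).takeWhile (fun s => s = -1)).length with hb
    split_ifs with h1 h2
    · simp only [false_iff]
      intro hT
      obtain ⟨_, hhead, hhead2, hne2, _⟩ := hT
      have hapos : 0 < a :=
        takeWhile_pos_of_head _ _ _ hhead (by simp)
      have hbpos : 0 < b :=
        takeWhile_pos_of_head _ _ _ hhead2 (by simp)
      have hr2pos : 0 < (((pvSigns nums).dropWhile (fun s => s = 1)).dropWhile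
          (fun s => s = -1)).length := List.length_pos_of_ne_nil hne2
      omega
    · simp only [false_iff]
      intro hT
      obtain ⟨_, hhead, hhead2, hne2, _⟩ := hT
      have hbpos : 0 < b :=
        takeWhile_pos_of_head _ _ _ hhead2 (by simp)
      have hr2pos : 0 < (((pvSigns nums).dropWhile (fun s => s = 1)).dropWhile
          (fun s => s = -1)).length := List.length_pos_of_ne_nil hne2
      omega
    · -- final loop case
      rw [forLoop_eq nums (nums.length - 1 - (a + b)) (a + b) (by omega)]
      have hdq : (pvSigns nums).drop (a + b)
          = ((pvSigns nums).dropWhile (fun s => s = 1)).dropWhile (fun s => s = -1) := by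
        rw [← hr1b, ← hda, List.drop_drop]
      rw [hdq]
      constructor
      · intro hall
        have hapos : 0 < a := by omega
        have hbpos : 0 < b := by omega
        obtain ⟨x, hx, hx1⟩ := head_of_takeWhile_pos _ _ hapos
        obtain ⟨y, hy, hy1⟩ := head_of_takeWhile_pos _ _ hbpos
        simp at hx1 hy1
        refine ⟨hn3, by rw [hx, hx1], by rw [hy, hy1], ?_, ?_⟩
        · intro hnil
          rw [hnil] at hr1_split
          simp at hr1_split
          omega
        · intro s hs
          have := List.all_eq_true.mp hall s hs
          simpa using this
      · intro hT
        obtain ⟨_, _, _, _, hall⟩ := hT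
        apply List.all_eq_true.mpr
        intro s hs
        simpa using hall s hs

lemma B_char (nums : List Int) : isTrionic_alt nums = true ↔ TriShape nums := by
  by_cases hn : nums.length < 3
  · simp only [isTrionic_alt, if_pos hn, TriShape]
    simp
    omega
  · have hdlen := pvSigns_length nums
    obtain ⟨s, l, hd⟩ : ∃ s l, pvSigns nums = s :: l := by
      cases h : pvSigns nums with
      | nil => rw [h] at hdlen; simp at hdlen; omega
      | cons s l => exact ⟨s, l, rfl⟩
    have hfold : (pvSigns nums).foldl pvRunStep [] = s :: runsFrom s l := by
      rw [hd, List.foldl_cons]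
      have h0 : pvRunStep [] s = [s] := by simp [pvRunStep]
      rw [h0, foldl_runStep l [s] s (by simp) (by simp)]
      simp
    rw [isTrionic_alt, if_neg hn, decide_eq_true_iff, hfold]
    unfold TriShape
    rw [hd]
    constructor
    · intro h3
      have hs1 : s = 1 ∧ runsFrom s l = [-1, 1] := by
        constructor
        · exact (List.cons_eq_cons.mp h3).1
        · exact (List.cons_eq_cons.mp h3).2
      obtain ⟨hs, hrf⟩ := hs1
      subst hs
      rw [runsFrom_dropWhile] at hrf
      have hdw : (1 :: l).dropWhile (fun s => s = (1:Int)) = l.dropWhile (fun s => s = 1) := by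
        simp
      rw [hdw]
      cases h1 : l.dropWhile (fun s => s = (1:Int)) with
      | nil => rw [h1] at hrf; simp at hrf
      | cons t l2 =>
        rw [h1] at hrf
        simp only at hrf
        have ht : t = -1 := (List.cons_eq_cons.mp hrf).1
        have hrf2 : runsFrom t l2 = [1] := (List.cons_eq_cons.mp hrf).2
        subst ht
        have hdw2 : ((-1) :: l2).dropWhile (fun s => s = (-1:Int)) = l2.dropWhile (fun s => s = -1) := by
          simp
        rw [hdw2]
        rw [runsFrom_dropWhile] at hrf2
        cases h2 : l2.dropWhile (fun s => s = (-1:Int)) with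
        | nil => rw [h2] at hrf2; simp at hrf2
        | cons u l3 =>
          rw [h2] at hrf2
          simp only at hrf2
          have hu : u = 1 := (List.cons_eq_cons.mp hrf2).1
          have hrf3 : runsFrom u l3 = [] := (List.cons_eq_cons.mp hrf2).2
          subst hu
          have hall3 := (runsFrom_eq_nil_iff _ _).mp hrf3
          refine ⟨by omega, rfl, by simp, by simp, ?_⟩
          intro v hv
          rcases List.mem_cons.mp hv with h | h
          · exact h
          · exact hall3 v h
    · intro hT
      obtain ⟨_, hhead, hhead2, hne2, hall⟩ := hT
      have hs : s = 1 := by simpa using hhead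
      subst hs
      have hdw : (1 :: l).dropWhile (fun s => s = (1:Int)) = l.dropWhile (fun s => s = 1) := by
        simp
      rw [hdw] at hhead2 hne2 hall
      congr 1
      rw [runsFrom_dropWhile]
      cases h1 : l.dropWhile (fun s => s = (1:Int)) with
      | nil => rw [h1] at hhead2; simp at hhead2
      | cons t l2 =>
        rw [h1] at hhead2 hne2 hall
        have ht : t = -1 := by simpa using hhead2
        subst ht
        have hdw2 : ((-1) :: l2).dropWhile (fun s => s = (-1:Int)) = l2.dropWhile (fun s => s = -1) := by
          simp
        rw [hdw2] at hne2 hall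
        simp only
        congr 1
        rw [runsFrom_dropWhile]
        cases h2 : l2.dropWhile (fun s => s = (-1:Int)) with
        | nil => exact absurd h2 hne2
        | cons u l3 =>
          rw [h2] at hall
          have hu : u = 1 := hall u (by simp)
          subst hu
          simp only
          congr 1
          apply (runsFrom_eq_nil_iff _ _).mpr
          intro v hv
          exact hall v (by simp [hv])

-- ===== VERDICT (by name: the statement is the Claim_ definition above) =====
theorem isTrionic_spec : Claim_equal_isTrionic := by
  intro nums _
  show isTrionic nums = isTrionic_alt nums
  rw [Bool.eq_iff_iff, A_char, B_char]
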